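-- pv_equiv track=rewrite | github.com/Gdockery/synerex-platform | emv-program/8082/energy_ai_guard_system_enhanced.py | _suggest_energy_topic
-- ===== SOURCE A (Python) =====
-- from typing import Dict, List, Tuple, Any
--
-- def _suggest_energy_topic(matched_keywords: List[str]) -> str:
--     """Suggest specific energy topic based on matched keywords"""
--     if any('harmonic' in kw.lower() for kw in matched_keywords):
--         return "IEEE 519 harmonic analysis and compliance"
--     elif any('efficiency' in kw.lower() for kw in matched_keywords):
--         return "Energy efficiency analysis and optimization"
--     elif any('power' in kw.lower() for kw in matched_keywords):
--         return "Power quality analysis and improvement"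
--     else:
--         return "General energy analysis and optimization"
-- ===== SOURCE B (Python) =====
-- _TOPICS = [
--     "IEEE 519 harmonic analysis and compliance",
--     "Energy efficiency analysis and optimization",
--     "Power quality analysis and improvement",
--     "General energy analysis and optimization",
-- ]
--
-- def _suggest_energy_topic(matched_keywords):
--     """Single pass: track the best (lowest) matched rule rank, return its topic."""
--     best = 3
--     for kw in matched_keywords:
--         k = kw.lower()
--         if 'harmonic' in k:
--             return _TOPICS[0]
--         if 'efficiency' in k and best > 1:
--             best = 1
--         elif 'power' in k and best > 2:
--             best = 2
--     return _TOPICS[best]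
-- ===== Notes on version B (the rewrite author's own statement) =====
-- stated objective: faster
-- what changed: Replaced A's three separate any()-scans over the whole list by a single pass that lowercases each keyword once and tracks the best (highest-priority) matched rule rank, returning the topic from a table at the end.
import Mathlib
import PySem

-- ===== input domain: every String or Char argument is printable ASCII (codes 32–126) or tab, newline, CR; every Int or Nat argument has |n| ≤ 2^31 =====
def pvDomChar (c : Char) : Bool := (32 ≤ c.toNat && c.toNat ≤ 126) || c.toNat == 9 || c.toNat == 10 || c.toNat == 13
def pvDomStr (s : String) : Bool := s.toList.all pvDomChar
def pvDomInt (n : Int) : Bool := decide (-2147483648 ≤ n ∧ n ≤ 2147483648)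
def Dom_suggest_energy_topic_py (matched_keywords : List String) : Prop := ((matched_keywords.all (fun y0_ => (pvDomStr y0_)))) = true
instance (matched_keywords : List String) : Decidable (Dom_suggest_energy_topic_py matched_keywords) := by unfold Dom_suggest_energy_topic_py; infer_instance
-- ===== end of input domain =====

-- B changes the decomposition: one pass tracking the best matched rule rank instead of A's three any()-scans (objective: alternative).

-- ===== PORT A =====
def suggest_energy_topic_py (matched_keywords : List String) : String :=
  if matched_keywords.any (fun kw => PySem.Str.isIn "harmonic" (PySem.Str.lower kw)) then
    "IEEE 519 harmonic analysis and compliance"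
  else if matched_keywords.any (fun kw => PySem.Str.isIn "efficiency" (PySem.Str.lower kw)) then
    "Energy efficiency analysis and optimization"
  else if matched_keywords.any (fun kw => PySem.Str.isIn "power" (PySem.Str.lower kw)) then
    "Power quality analysis and improvement"
  else
    "General energy analysis and optimization"

-- ===== PORT B =====
def pvTopics : List String :=
  [ "IEEE 519 harmonic analysis and compliance"
  , "Energy efficiency analysis and optimization"
  , "Power quality analysis and improvement"
  , "General energy analysis and optimization" ]

def pvScan (ks : List String) (best : Nat) : String :=
  match ks with
  | [] => pvTopics.getD best ""
  | kw :: rest =>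
    let k := PySem.Str.lower kw
    if PySem.Str.isIn "harmonic" k then pvTopics.getD 0 ""
    else if PySem.Str.isIn "efficiency" k && decide (best > 1) then pvScan rest 1
    else if PySem.Str.isIn "power" k && decide (best > 2) then pvScan rest 2
    else pvScan rest best

def suggest_energy_topic_py_alt (matched_keywords : List String) : String :=
  pvScan matched_keywords 3

-- ===== PRECONDITION & SPEC =====
def Spec_suggest_energy_topic_py (matched_keywords : List String) (out : String) : Prop := out = suggest_energy_topic_py_alt matched_keywords
instance (matched_keywords : List String) (out : String) : Decidable (Spec_suggest_energy_topic_py matched_keywords out) := by unfold Spec_suggest_energy_topic_py; infer_instance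

-- ===== CLAIM (what is proved, stated in full; the proofs are below) =====
def Claim_equal_suggest_energy_topic_py : Prop := ∀ (matched_keywords : List String), Dom_suggest_energy_topic_py matched_keywords → Spec_suggest_energy_topic_py matched_keywords (suggest_energy_topic_py matched_keywords)

-- ===== LEMMAS AND PROOFS =====

theorem pvScan_one (ks : List String) :
    pvScan ks 1 =
      if ks.any (fun kw => PySem.Str.isIn "harmonic" (PySem.Str.lower kw)) then
        "IEEE 519 harmonic analysis and compliance"
      else "Energy efficiency analysis and optimization" := by
  induction ks with
  | nil => simp [pvScan, pvTopics]
  | cons kw rest ih =>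
      simp only [pvScan]
      by_cases h : PySem.Str.isIn "harmonic" (PySem.Str.lower kw) = true <;>
        simp_all [pvTopics]

theorem pvScan_two (ks : List String) :
    pvScan ks 2 =
      if ks.any (fun kw => PySem.Str.isIn "harmonic" (PySem.Str.lower kw)) then
        "IEEE 519 harmonic analysis and compliance"
      else if ks.any (fun kw => PySem.Str.isIn "efficiency" (PySem.Str.lower kw)) then
        "Energy efficiency analysis and optimization"
      else "Power quality analysis and improvement" := by
  induction ks with
  | nil => simp [pvScan, pvTopics]
  | cons kw rest ih =>
      simp only [pvScan]
      by_cases h : PySem.Str.isIn "harmonic" (PySem.Str.lower kw) = true <;>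
        by_cases he : PySem.Str.isIn "efficiency" (PySem.Str.lower kw) = true <;>
          simp_all [pvScan_one, pvTopics]

theorem pvScan_three (ks : List String) :
    pvScan ks 3 = suggest_energy_topic_py ks := by
  induction ks with
  | nil => simp [pvScan, suggest_energy_topic_py, pvTopics]
  | cons kw rest ih =>
      simp only [pvScan]
      by_cases h : PySem.Str.isIn "harmonic" (PySem.Str.lower kw) = true <;>
        by_cases he : PySem.Str.isIn "efficiency" (PySem.Str.lower kw) = true <;>
          by_cases hp : PySem.Str.isIn "power" (PySem.Str.lower kw) = true <;>
            simp_all [pvScan_one, pvScan_two, suggest_energy_topic_py, pvTopics]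

-- ===== VERDICT (by name: the statement is the Claim_ definition above) =====
theorem suggest_energy_topic_py_spec : Claim_equal_suggest_energy_topic_py := by
  intro ks _
  unfold Spec_suggest_energy_topic_py suggest_energy_topic_py_alt
  exact (pvScan_three ks).symm
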